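-- pv_equiv track=rewrite | github.com/XxGhoulPr0xX/COD-OperationsHQ | 7° Semestre/Python/ManejoConsultas.py | separarPorMarca
-- ===== SOURCE A (Python) =====
-- def separarPorMarca(instrumentos, marca_filtrar=None):
--     instrumentos_por_marca = {}
--     for instrumento in instrumentos:
--         marca = instrumento.get('marca')
--         if marca_filtrar is None or marca == marca_filtrar:
--             if marca not in instrumentos_por_marca:
--                 instrumentos_por_marca[marca] = []
--             instrumentos_por_marca[marca].append(instrumento)
--     return instrumentos_por_marca
-- ===== SOURCE B (Python) =====
-- def separarPorMarca(instrumentos, marca_filtrar=None):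
--     # B: index-first decomposition — collect the distinct brands (first-occurrence
--     # order) among the items that pass the filter, then one scan per brand.
--     def ok(i):
--         return marca_filtrar is None or i.get('marca') == marca_filtrar
--     marcas = list(dict.fromkeys(i.get('marca') for i in instrumentos if ok(i)))
--     return {m: [i for i in instrumentos if ok(i) and i.get('marca') == m]
--             for m in marcas}
-- ===== Notes on version B (the rewrite author's own statement) =====
-- stated objective: alternative
-- what changed: A builds the grouping in one accumulating pass over a dict; B first computes the ordered list of distinct brands (dict.fromkeys) and then builds each group by a fresh per-brand scan of the input. Pre_ excludes only inputs on which A's return value is not a str-keyed dict (an item without a 'marca' key while marca_filtrar is None makes A key a group by None).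
-- outside the precondition, e.g. on separarPorMarca([{}], None): A returns {None: [{}]}, B returns {None: [{}]}
import Mathlib
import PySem

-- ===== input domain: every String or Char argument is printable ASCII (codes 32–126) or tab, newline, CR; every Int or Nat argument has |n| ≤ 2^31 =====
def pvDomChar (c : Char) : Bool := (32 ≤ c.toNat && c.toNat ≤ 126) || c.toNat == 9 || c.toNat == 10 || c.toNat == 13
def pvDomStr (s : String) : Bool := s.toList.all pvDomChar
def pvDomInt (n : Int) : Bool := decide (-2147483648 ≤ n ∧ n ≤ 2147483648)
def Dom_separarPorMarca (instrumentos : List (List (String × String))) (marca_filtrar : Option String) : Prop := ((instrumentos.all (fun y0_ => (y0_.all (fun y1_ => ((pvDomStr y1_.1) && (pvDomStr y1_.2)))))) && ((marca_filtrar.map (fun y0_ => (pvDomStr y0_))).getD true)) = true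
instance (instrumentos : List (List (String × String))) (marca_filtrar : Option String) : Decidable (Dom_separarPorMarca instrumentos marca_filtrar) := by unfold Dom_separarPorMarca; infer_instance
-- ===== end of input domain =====

-- B replaces A's single accumulating dict pass by an ordered distinct-brands pass followed by
-- one scan per brand (alternative decomposition, not faster). Return-value equivalence.

-- shared helper: instrumento.get('marca') on the association-list dict
def pvGetMarca (i : List (String × String)) : Option String :=
  (PySem.Dict.ofList i).get? "marca"

-- ===== PORT A =====
-- one pass over an accumulating dict; "if marca not in d: d[marca] = []" followed by the append
-- is d.setdefault(marca, []) then PySem.Dict.modify.  An item without a 'marca' key passing the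
-- filter would be keyed by None in Python (not a String): the port skips it — exactly the
-- inputs Pre_ excludes.
def separarPorMarca (instrumentos : List (List (String × String))) (marca_filtrar : Option String) : List (String × List (List (String × String))) :=
  (instrumentos.foldl
    (fun d instrumento =>
      let marca := pvGetMarca instrumento
      if marca_filtrar = none ∨ marca = marca_filtrar then
        match marca with
        | some m => (d.setdefault m []).modify m [] (fun l => l ++ [instrumento])
        | none => d
      else d)
    PySem.Dict.empty).items

-- ===== PORT B =====
-- distinct brands first (dict.fromkeys = PySem.List.dedup, first-occurrence order), then one
-- scan per brand; a None brand (possible only outside Pre_) is dropped by the filterMap, as the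
-- port cannot key a String-keyed result by None.
def separarPorMarca_alt (instrumentos : List (List (String × String))) (marca_filtrar : Option String) : List (String × List (List (String × String))) :=
  let ok : List (String × String) → Bool :=
    fun i => decide (marca_filtrar = none) || (pvGetMarca i == marca_filtrar)
  let marcas := PySem.List.dedup ((instrumentos.filter ok).map pvGetMarca)
  marcas.filterMap (fun om =>
    om.map (fun m => (m, instrumentos.filter (fun i => ok i && (pvGetMarca i == some m)))))

-- ===== PRECONDITION & SPEC =====
-- Pre_ excludes exactly the inputs on which A's (and B's) Python returns a dict keyed by None —
-- marca_filtrar is None and some item has no 'marca' key — a value outside the declared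
-- str-keyed return type, hence unrepresentable here.
def Pre_separarPorMarca (instrumentos : List (List (String × String))) (marca_filtrar : Option String) : Prop :=
  marca_filtrar = none → ∀ i ∈ instrumentos, (pvGetMarca i).isSome = true
instance (instrumentos : List (List (String × String))) (marca_filtrar : Option String) : Decidable (Pre_separarPorMarca instrumentos marca_filtrar) := by unfold Pre_separarPorMarca; infer_instance

def pvWitness_separarPorMarca : (List (List (String × String))) × Option String :=
  ([[("marca", "Fender")], [("marca", "Yamaha")], [("marca", "Fender")]], none)

def Spec_separarPorMarca (instrumentos : List (List (String × String))) (marca_filtrar : Option String) (out : List (String × List (List (String × String)))) : Prop := out = separarPorMarca_alt instrumentos marca_filtrar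
instance (instrumentos : List (List (String × String))) (marca_filtrar : Option String) (out : List (String × List (List (String × String)))) : Decidable (Spec_separarPorMarca instrumentos marca_filtrar out) := by unfold Spec_separarPorMarca; infer_instance

-- ===== CLAIM (what is proved, stated in full; the proofs are below) =====
def Claim_equal_separarPorMarca : Prop := ∀ (instrumentos : List (List (String × String))) (marca_filtrar : Option String), Dom_separarPorMarca instrumentos marca_filtrar → Pre_separarPorMarca instrumentos marca_filtrar → Spec_separarPorMarca instrumentos marca_filtrar (separarPorMarca instrumentos marca_filtrar)

-- ===== LEMMAS AND PROOFS =====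

-- A's "if marca not in d: d[marca] = [] ; d[marca].append(x)" step equals one modify
theorem pv_setdefault_modify (d : PySem.Dict String (List (List (String × String)))) (m : String)
    (f : List (List (String × String)) → List (List (String × String))) :
    (d.setdefault m []).modify m [] f = d.modify m [] f := by
  by_cases h : d.contains m = true
  · rw [PySem.Dict.setdefault_of_contains d [] h]
  · rw [PySem.Dict.setdefault_of_not_contains d [] (by simpa using h)]
    simp [PySem.Dict.modify, PySem.Dict.insert_insert_self,
      PySem.Dict.getD_of_not_contains d [] (by simpa using h)]

-- ordered dedup commutes with mapping the injective constructor `some`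
theorem pv_ofList_map_some (l : List String) :
    PySem.Set.ofList (l.map some) = (PySem.Set.ofList l).map some := by
  induction l using List.reverseRecOn with
  | nil => rfl
  | append_singleton xs x ih =>
      simp only [List.map_append, List.map_cons, List.map_nil,
        PySem.Set.ofList_append, PySem.Set.update, ih]
      simp only [List.foldl_cons, List.foldl_nil, PySem.Set.add]
      split_ifs with h1 h2 h2 <;> simp_all

-- the brand of an item that is known to have one, as a String
def pvKf (i : List (String × String)) : String := (pvGetMarca i).getD ""

theorem separarPorMarca_eq_alt (instrumentos : List (List (String × String)))
    (marca_filtrar : Option String)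
    (hpre : Pre_separarPorMarca instrumentos marca_filtrar) :
    separarPorMarca instrumentos marca_filtrar = separarPorMarca_alt instrumentos marca_filtrar := by
  unfold Pre_separarPorMarca at hpre
  unfold separarPorMarca separarPorMarca_alt
  set ok : List (String × String) → Bool :=
    fun i => decide (marca_filtrar = none) || (pvGetMarca i == marca_filtrar) with hok
  -- every item that passes the filter has a brand
  have hL : ∀ i ∈ instrumentos.filter ok, pvGetMarca i = some (pvKf i) := by
    intro i hi
    rw [List.mem_filter] at hi
    have hsome : (pvGetMarca i).isSome = true := by
      rcases h : marca_filtrar with _ | f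
      · exact hpre h i hi.1
      · have := hi.2
        rw [hok, h] at this
        simp only [reduceCtorEq, decide_false, Bool.false_or, beq_iff_eq] at this
        rw [this]; rfl
    obtain ⟨v, hv⟩ := Option.isSome_iff_exists.mp hsome
    simp [pvKf, hv]
  -- A: the conditional fold is a fold over the filtered list
  have hA1 : (instrumentos.foldl
      (fun d instrumento =>
        let marca := pvGetMarca instrumento
        if marca_filtrar = none ∨ marca = marca_filtrar then
          match marca with
          | some m => (d.setdefault m []).modify m [] (fun l => l ++ [instrumento])
          | none => d
        else d)
      PySem.Dict.empty)
      = ((instrumentos.filter ok).foldl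
          (fun d instrumento =>
            match pvGetMarca instrumento with
            | some m => (d.setdefault m []).modify m [] (fun l => l ++ [instrumento])
            | none => d)
          PySem.Dict.empty) := by
    rw [List.foldl_filter]
    apply PySem.List.foldl_congr_mem
    intro d i _
    have hcond : (marca_filtrar = none ∨ pvGetMarca i = marca_filtrar) ↔ ok i = true := by
      simp [hok]
    by_cases h : ok i = true
    · rw [if_pos (hcond.mpr h), if_pos h]
    · rw [if_neg (fun hc => h (hcond.mp hc)), if_neg h]
  -- A: on the filtered list every step is one modify keyed by pvKf
  have hA2 : ((instrumentos.filter ok).foldl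
          (fun d instrumento =>
            match pvGetMarca instrumento with
            | some m => (d.setdefault m []).modify m [] (fun l => l ++ [instrumento])
            | none => d)
          PySem.Dict.empty)
      = (((instrumentos.filter ok).map (fun i => (pvKf i, i))).foldl
          (fun d p => d.modify p.1 [] (fun l => l ++ [p.2]))
          PySem.Dict.empty) := by
    rw [List.foldl_map]
    apply PySem.List.foldl_congr_mem
    intro d i hi
    rw [hL i hi]
    exact pv_setdefault_modify d (pvKf i) _
  rw [hA1, hA2]
  set L := instrumentos.filter ok with hLdef
  set P := L.map (fun i => (pvKf i, i)) with hP
  set D := P.foldl (fun d p => d.modify p.1 [] (fun l => l ++ [p.2])) PySem.Dict.empty with hD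
  have hnodup : D.keys.Nodup := by
    rw [hD]
    exact PySem.Dict.nodup_keys_foldl_modify_key P Prod.fst [] (fun _ p l => l ++ [p.2])
      PySem.Dict.empty (by simp)
  have hkeys : D.keys = PySem.Set.ofList (L.map pvKf) := by
    rw [hD, PySem.Dict.keys_foldl_modify_key P Prod.fst [] (fun _ p l => l ++ [p.2]) PySem.Dict.empty]
    simp [hP, PySem.Set.update_nil_left, List.map_map, Function.comp_def]
  have hget : ∀ m : String, D.getD m [] = L.filter (fun i => pvKf i == m) := by
    intro m
    rw [hD, PySem.Dict.getD_foldl_modify_append P PySem.Dict.empty m]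
    simp [hP, List.filter_map, List.map_map, Function.comp_def]
  have hmapL : L.map pvGetMarca = (L.map pvKf).map some := by
    rw [List.map_map]
    exact List.map_congr_left hL
  simp only [PySem.List.dedup_eq_ofList]
  rw [hmapL, pv_ofList_map_some, List.filterMap_map]
  rw [PySem.Dict.items_eq_map_keys D hnodup [], hkeys]
  rw [show ((fun om => om.map (fun m => (m, instrumentos.filter (fun i => ok i && (pvGetMarca i == some m))))) ∘ some)
      = (some ∘ (fun m => (m, instrumentos.filter (fun i => ok i && (pvGetMarca i == some m))))) from rfl]
  rw [List.filterMap_eq_map]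
  apply List.map_congr_left
  intro m _
  rw [hget m]
  refine congrArg _ ?_
  rw [hLdef, List.filter_filter]
  apply List.filter_congr
  intro i hi
  by_cases h : ok i = true
  · have hmi : pvGetMarca i = some (pvKf i) := hL i (by rw [List.mem_filter]; exact ⟨hi, h⟩)
    rw [h, hmi]
    simp
  · rw [Bool.not_eq_true] at h
    rw [h]
    simp

-- ===== VERDICT (by name: the statement is the Claim_ definition above) =====
theorem separarPorMarca_spec : Claim_equal_separarPorMarca := by
  intro instrumentos marca_filtrar _ hpre
  exact separarPorMarca_eq_alt instrumentos marca_filtrar hpre
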